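-- pv_equiv track=rewrite | github.com/Kerram/Deephol-Bert-Zpp | pretraining/data-generation/tree_parser.py | find_end_of_subtree
-- ===== SOURCE A (Python) =====
-- def find_end_of_subtree(sentence, pos):
--   if sentence[pos] != "(":
--     return pos
--   sum = 1
--   while sum > 0:
--     pos += 1
--     if (pos >= len(sentence)):
--       return -1
--     if sentence[pos] == "(":
--       sum += 1
--     elif sentence[pos] == ")":
--       sum -= 1
--     if sum == 0:
--       return pos
--   return -1
-- ===== SOURCE B (Python) =====
-- def find_end_of_subtree(sentence, pos):
--   if sentence[pos] != "(":
--     return pos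
--   j = _close_from(sentence, pos + 1)
--   return -1 if j is None else j
--
--
-- def _close_from(sentence, i):
--   # index of the first unmatched ")" at or after i, or None if there is none
--   n = len(sentence)
--   while i < n:
--     c = sentence[i]
--     if c == ")":
--       return i
--     if c == "(":
--       j = _close_from(sentence, i + 1)
--       if j is None:
--         return None
--       i = j + 1
--     else:
--       i += 1
--   return None
-- ===== Notes on version B (the rewrite author's own statement) =====
-- stated objective: alternative
-- what changed: Replaces A's single while-loop with a depth counter by a recursive-descent helper that returns the first unmatched ')' and recurses into each nested child subtree, propagating None for running off the end.
import Mathlib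
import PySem

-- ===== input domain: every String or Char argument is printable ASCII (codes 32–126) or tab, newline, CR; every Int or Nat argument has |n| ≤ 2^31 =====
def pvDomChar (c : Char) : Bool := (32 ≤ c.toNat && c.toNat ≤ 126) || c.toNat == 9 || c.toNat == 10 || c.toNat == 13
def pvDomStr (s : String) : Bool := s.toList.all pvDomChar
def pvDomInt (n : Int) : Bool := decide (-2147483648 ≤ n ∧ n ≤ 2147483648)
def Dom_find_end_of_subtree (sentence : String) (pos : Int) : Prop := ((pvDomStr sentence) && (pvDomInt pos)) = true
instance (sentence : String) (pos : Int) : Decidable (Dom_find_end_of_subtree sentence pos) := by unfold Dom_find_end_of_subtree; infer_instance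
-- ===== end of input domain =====

-- B replaces A's single depth-counter loop by a recursive descent over nested subtrees
-- (a helper that returns the first unmatched ")" and recurses into each child); objective: alternative.

-- ===== PORT A =====
-- A's while loop: state (pos, sum); each round increments pos, returns -1 off the end,
-- adjusts sum on parens, returns pos when sum hits 0; the trailing `return -1` is the
-- final `else` branch (while-condition `sum > 0` re-checked).
def fesA_loop (s : List Char) (pos : Int) (sum : Int) : Int :=
  if _h : (s.length : Int) ≤ pos + 1 then -1
  else
    let c := PySem.List.pyGet? s (pos + 1)
    let sum' := if c = some '(' then sum + 1 else if c = some ')' then sum - 1 else sum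
    if sum' = 0 then pos + 1
    else if 0 < sum' then fesA_loop s (pos + 1) sum'
    else -1
termination_by ((s.length : Int) - pos).toNat
decreasing_by omega

def find_end_of_subtree (sentence : String) (pos : Int) : Int :=
  let s := sentence.toList
  if PySem.List.pyGet? s pos ≠ some '(' then pos   -- pyGet? none = IndexError, excluded by Pre_
  else fesA_loop s pos 1

-- ===== PORT B =====
-- B's helper `_close_from`: first unmatched ")" at or after i (none if it runs off the end);
-- on "(" it recursively finds the child's end and continues just past it.  The `fuel`
-- parameter only makes the recursion structurally terminating; the top-level fuel
-- 2*len+1 is never exhausted (proved in the lemmas below).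
def fesB_close (fuel : Nat) (s : List Char) (i : Int) : Option Int :=
  match fuel with
  | 0 => none
  | fuel + 1 =>
    if (s.length : Int) ≤ i then none
    else
      let c := PySem.List.pyGet? s i
      if c = some ')' then some i
      else if c = some '(' then
        match fesB_close fuel s (i + 1) with
        | none => none
        | some j => fesB_close fuel s (j + 1)
      else fesB_close fuel s (i + 1)

def find_end_of_subtree_alt (sentence : String) (pos : Int) : Int :=
  let s := sentence.toList
  if PySem.List.pyGet? s pos ≠ some '(' then pos   -- pyGet? none = IndexError, excluded by Pre_
  else
    match fesB_close (2 * s.length + 1) s (pos + 1) with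
    | none => -1
    | some j => j

-- ===== PRECONDITION & SPEC =====
-- Pre_ excludes exactly the inputs where `sentence[pos]` raises IndexError (pos out of range).
def Pre_find_end_of_subtree (sentence : String) (pos : Int) : Prop :=
  -(sentence.toList.length : Int) ≤ pos ∧ pos < (sentence.toList.length : Int)
instance (sentence : String) (pos : Int) : Decidable (Pre_find_end_of_subtree sentence pos) := by
  unfold Pre_find_end_of_subtree; infer_instance

def pvWitness_find_end_of_subtree : String × Int := ("(a)", 0)

def Spec_find_end_of_subtree (sentence : String) (pos : Int) (out : Int) : Prop := out = find_end_of_subtree_alt sentence pos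
instance (sentence : String) (pos : Int) (out : Int) : Decidable (Spec_find_end_of_subtree sentence pos out) := by unfold Spec_find_end_of_subtree; infer_instance

-- ===== CLAIM (what is proved, stated in full; the proofs are below) =====
def Claim_equal_find_end_of_subtree : Prop := ∀ (sentence : String) (pos : Int), Dom_find_end_of_subtree sentence pos → Pre_find_end_of_subtree sentence pos → Spec_find_end_of_subtree sentence pos (find_end_of_subtree sentence pos)

-- ===== LEMMAS AND PROOFS =====

-- B's helper never returns an index before its starting point.
theorem fesB_close_ge (fuel : Nat) : ∀ (s : List Char) (i j : Int),
    fesB_close fuel s i = some j → i ≤ j := by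
  induction fuel with
  | zero => intro s i j h; simp [fesB_close] at h
  | succ fuel ih =>
    intro s i j h
    rw [fesB_close] at h
    by_cases hl : (s.length : Int) ≤ i
    · simp [hl] at h
    · simp only [if_neg hl] at h
      by_cases hc : PySem.List.pyGet? s i = some ')'
      · simp [hc] at h; omega
      · simp only [if_neg hc] at h
        by_cases ho : PySem.List.pyGet? s i = some '('
        · simp only [if_pos ho] at h
          cases hin : fesB_close fuel s (i + 1) with
          | none => rw [hin] at h; simp at h
          | some j1 =>
            rw [hin] at h; simp at h
            have h1 := ih s (i + 1) j1 hin
            have h2 := ih s (j1 + 1) j h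
            omega
        · simp only [if_neg ho] at h
          have := ih s (i + 1) j h
          omega

-- Main invariant: A's counter loop at depth k agrees with B's recursive descent.
theorem fes_main (fuel : Nat) : ∀ (s : List Char) (k pos : Int), 1 ≤ k →
    (s.length : Int) - (pos + 1) < (fuel : Int) →
    fesA_loop s pos k =
      (match fesB_close fuel s (pos + 1) with
       | none => -1
       | some j => if k = 1 then j else fesA_loop s j (k - 1)) := by
  induction fuel with
  | zero =>
    intro s k pos _ hf
    have hl : (s.length : Int) ≤ pos + 1 := by omega
    rw [fesA_loop]
    simp [fesB_close, hl]
  | succ fuel ih =>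
    intro s k pos hk hf
    rw [fesA_loop, fesB_close]
    by_cases hl : (s.length : Int) ≤ pos + 1
    · simp [hl]
    · simp only [if_neg hl, dif_neg hl]
      by_cases hc : PySem.List.pyGet? s (pos + 1) = some ')'
      · have ho : ¬ PySem.List.pyGet? s (pos + 1) = some '(' := by simp [hc]
        simp only [if_pos hc, if_neg ho]
        by_cases hk1 : k = 1
        · simp [hk1]
        · have : ¬ (k - 1 = 0) := by omega
          have h2 : 0 < k - 1 := by omega
          simp only [this, hk1, if_false, if_pos h2]
      · simp only [if_neg hc]
        by_cases ho : PySem.List.pyGet? s (pos + 1) = some '('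
        · simp only [if_pos ho]
          have hne : ¬ (k + 1 = 0) := by omega
          have hpos : 0 < k + 1 := by omega
          simp only [hne, if_pos hpos, ite_false]
          have ih1 := ih s (k + 1) (pos + 1) (by omega) (by omega)
          rw [ih1]
          cases hin : fesB_close fuel s (pos + 1 + 1) with
          | none => simp
          | some j =>
            have hj : pos + 1 + 1 ≤ j := fesB_close_ge fuel s _ _ hin
            have hk2 : ¬ (k + 1 = 1) := by omega
            simp only [hk2, ite_false]
            have : k + 1 - 1 = k := by omega
            rw [this]
            have ih2 := ih s k j hk (by omega)
            rw [ih2]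
        · simp only [if_neg ho]
          have hne : ¬ (k = 0) := by omega
          have hpos : 0 < k := by omega
          simp only [if_neg hne, if_pos hpos]
          exact ih s k (pos + 1) hk (by omega)

-- ===== VERDICT (by name: the statement is the Claim_ definition above) =====
theorem find_end_of_subtree_spec : Claim_equal_find_end_of_subtree := by
  intro sentence pos _hdom hpre
  obtain ⟨h1, h2⟩ := hpre
  unfold Spec_find_end_of_subtree find_end_of_subtree find_end_of_subtree_alt
  by_cases h : PySem.List.pyGet? sentence.toList pos = some '('
  · simp only [h, ne_eq, not_true_eq_false, if_false]
    have hfuel : (sentence.toList.length : Int) - (pos + 1) <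
        ((2 * sentence.toList.length + 1 : Nat) : Int) := by push_cast; omega
    rw [fes_main (2 * sentence.toList.length + 1) sentence.toList 1 pos (by omega) hfuel]
    cases fesB_close (2 * sentence.toList.length + 1) sentence.toList (pos + 1) with
    | none => rfl
    | some j => simp
  · simp [h]
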